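-- pv_equiv track=rewrite | github.com/TheRealHZL/MentalHealth | src/ai/preprocessing/tokenizer.py | _preserve_emoticons
-- ===== SOURCE A (Python) =====
-- def _preserve_emoticons(text: str) -> str:
--     """Preserves emoticons and emojis during normalization"""
--
--     # Replace common emoticons with special tokens
--     emoticon_map = {
--         ':-)': ' <EMOTICON_HAPPY> ',
--         ':)': ' <EMOTICON_HAPPY> ',
--         ':-(': ' <EMOTICON_SAD> ',
--         ':(': ' <EMOTICON_SAD> ',
--         ':D': ' <EMOTICON_VERY_HAPPY> ',
--         ':/': ' <EMOTICON_CONFUSED> ',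
--         ':|': ' <EMOTICON_NEUTRAL> '
--     }
--
--     for emoticon, replacement in emoticon_map.items():
--         text = text.replace(emoticon, replacement)
--
--     return text
-- ===== SOURCE B (Python) =====
-- import re
--
-- _EMOTICON_MAP = {
--     ':-)': ' <EMOTICON_HAPPY> ',
--     ':)': ' <EMOTICON_HAPPY> ',
--     ':-(': ' <EMOTICON_SAD> ',
--     ':(': ' <EMOTICON_SAD> ',
--     ':D': ' <EMOTICON_VERY_HAPPY> ',
--     ':/': ' <EMOTICON_CONFUSED> ',
--     ':|': ' <EMOTICON_NEUTRAL> ',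
-- }
--
-- _EMOTICON_RE = re.compile('|'.join(re.escape(k) for k in _EMOTICON_MAP))
--
--
-- def _preserve_emoticons(text: str) -> str:
--     """Preserves emoticons and emojis during normalization (single-pass regex)"""
--     return _EMOTICON_RE.sub(lambda m: _EMOTICON_MAP[m.group(0)], text)
-- ===== Notes on version B (the rewrite author's own statement) =====
-- stated objective: idiomatic
-- what changed: A runs seven separate full-text str.replace passes (one per emoticon); B compiles one regex alternation over the same table and does a single left-to-right pass with a lookup of the matched emoticon.
import Mathlib
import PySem

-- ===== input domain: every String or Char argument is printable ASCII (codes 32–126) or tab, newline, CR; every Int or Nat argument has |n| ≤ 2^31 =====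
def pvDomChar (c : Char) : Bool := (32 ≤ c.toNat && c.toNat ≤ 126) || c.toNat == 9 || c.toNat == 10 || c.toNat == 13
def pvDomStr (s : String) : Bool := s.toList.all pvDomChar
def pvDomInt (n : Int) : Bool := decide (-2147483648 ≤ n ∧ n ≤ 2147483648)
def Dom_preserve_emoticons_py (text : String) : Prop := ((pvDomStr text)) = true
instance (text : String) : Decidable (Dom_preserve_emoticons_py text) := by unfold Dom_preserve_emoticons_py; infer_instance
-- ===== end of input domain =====

-- B replaces A's seven sequential str.replace passes with ONE left-to-right pass driven by a
-- compiled regex alternation over the same emoticon table (objective: idiomatic single pass).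

-- ===== PORT A =====
-- literal transliteration of A: the dict's seven (emoticon, replacement) pairs applied by
-- successive str.replace passes, in insertion order
def preserve_emoticons_py (text : String) : String :=
  let text := PySem.Str.replace text ":-)" " <EMOTICON_HAPPY> "
  let text := PySem.Str.replace text ":)" " <EMOTICON_HAPPY> "
  let text := PySem.Str.replace text ":-(" " <EMOTICON_SAD> "
  let text := PySem.Str.replace text ":(" " <EMOTICON_SAD> "
  let text := PySem.Str.replace text ":D" " <EMOTICON_VERY_HAPPY> "
  let text := PySem.Str.replace text ":/" " <EMOTICON_CONFUSED> "
  let text := PySem.Str.replace text ":|" " <EMOTICON_NEUTRAL> "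
  text

-- ===== PORT B =====
-- B's emoticon table, in the same insertion order as the dict (= the regex alternation order)
def emoTable : List (List Char × List Char) :=
  [ (":-)".toList, " <EMOTICON_HAPPY> ".toList)
  , (":)".toList, " <EMOTICON_HAPPY> ".toList)
  , (":-(".toList, " <EMOTICON_SAD> ".toList)
  , (":(".toList, " <EMOTICON_SAD> ".toList)
  , (":D".toList, " <EMOTICON_VERY_HAPPY> ".toList)
  , (":/".toList, " <EMOTICON_CONFUSED> ".toList)
  , (":|".toList, " <EMOTICON_NEUTRAL> ".toList) ]

-- the single pass of _EMOTICON_RE.sub: at each position try the alternatives in table order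
-- (Python's re picks the first matching alternative); on a match emit the mapped replacement
-- and continue after the match, otherwise emit the character and move on
def emoScan (l : List Char) : List Char :=
  match l with
  | [] => []
  | c :: t =>
    match emoTable.find? (fun pr => pr.1.isPrefixOf (c :: t)) with
    | some pr => pr.2 ++ emoScan (t.drop (pr.1.length - 1))
    | none => c :: emoScan t
termination_by l.length
decreasing_by
  all_goals simp [List.length_drop]

def preserve_emoticons_py_alt (text : String) : String :=
  String.ofList (emoScan text.toList)

-- ===== PRECONDITION & SPEC =====
def Spec_preserve_emoticons_py (text : String) (out : String) : Prop := out = preserve_emoticons_py_alt text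
instance (text : String) (out : String) : Decidable (Spec_preserve_emoticons_py text out) := by unfold Spec_preserve_emoticons_py; infer_instance

-- ===== CLAIM (what is proved, stated in full; the proofs are below) =====
def Claim_equal_preserve_emoticons_py : Prop := ∀ (text : String), Dom_preserve_emoticons_py text → Spec_preserve_emoticons_py text (preserve_emoticons_py text)

-- ===== LEMMAS AND PROOFS =====


def emoRep (old new : List Char) : List Char → List Char
  | [] => []
  | c :: t =>
    if old.isPrefixOf (c :: t) then new ++ emoRep old new (t.drop (old.length - 1))
    else c :: emoRep old new t
termination_by l => l.length
decreasing_by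
  all_goals simp [List.length_drop]

theorem emoRep_cons_neg (p n : List Char) (c : Char) (t : List Char)
    (h : p.isPrefixOf (c :: t) = false) : emoRep p n (c :: t) = c :: emoRep p n t := by
  simp only [emoRep, h]; simp

-- PySem's str.replace worker (fuel = length, reversed accumulator) computes emoRep
theorem emoGo_eq (old new : List Char) (hne : old ≠ []) :
    ∀ (fuel : Nat) (l acc : List Char), l.length ≤ fuel →
      PySem.Chars.replace.go old new fuel l acc = acc.reverse ++ emoRep old new l := by
  intro fuel
  induction fuel with
  | zero =>
    intro l acc h
    have hl : l = [] := by cases l <;> simp_all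
    subst hl
    rw [PySem.Chars.replace.go.eq_def]
    simp [emoRep]
  | succ m ih =>
    intro l acc h
    cases l with
    | nil =>
      rw [PySem.Chars.replace.go.eq_def]
      simp [emoRep]
    | cons c t =>
      rw [PySem.Chars.replace.go.eq_def]
      by_cases hp : old.isPrefixOf (c :: t) = true
      · simp only [hp, if_true]
        obtain ⟨a, o, rfl⟩ : ∃ a o, old = a :: o := by
          cases old with
          | nil => exact absurd rfl hne
          | cons a o => exact ⟨a, o, rfl⟩
        have hlen : (List.drop (a :: o).length (c :: t)).length ≤ m := by
          simp only [List.length_drop, List.length_cons] at *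
          omega
        rw [ih _ _ hlen]
        have hrep : emoRep (a :: o) new (c :: t)
            = new ++ emoRep (a :: o) new (t.drop ((a :: o).length - 1)) := by
          simp only [emoRep, hp]; simp
        rw [hrep]
        simp
      · have hp' : old.isPrefixOf (c :: t) = false := Bool.eq_false_iff.mpr hp
        simp only [hp', Bool.false_eq_true, if_false]
        have hlen : t.length ≤ m := by simp at h; omega
        rw [ih _ _ hlen, emoRep_cons_neg _ _ _ _ hp']
        simp

theorem replace_eq_emoRep (old new : List Char) (hne : old ≠ []) (s : List Char) :
    PySem.Chars.replace s old new = emoRep old new s := by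
  unfold PySem.Chars.replace
  rw [if_neg (by simp [List.isEmpty_iff, hne])]
  rw [emoGo_eq old new hne s.length s [] le_rfl]
  simp

theorem emoRep_head_cases (p n : List Char) (t : List Char) :
    t = [] ∨ (∃ r, emoRep p n t = n ++ r)
      ∨ (∃ c' t', t = c' :: t' ∧ emoRep p n t = c' :: emoRep p n t') := by
  cases t with
  | nil => exact Or.inl rfl
  | cons c' t' =>
    by_cases hp : p.isPrefixOf (c' :: t') = true
    · refine Or.inr (Or.inl ⟨emoRep p n (t'.drop (p.length - 1)), ?_⟩)
      simp only [emoRep, hp]; simp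
    · exact Or.inr (Or.inr ⟨c', t', rfl, emoRep_cons_neg _ _ _ _ (Bool.eq_false_iff.mpr hp)⟩)

theorem emoKM2 (x : Char) (hx : x ≠ ' ') (p n : List Char) (hn : n.head? = some ' ')
    (c : Char) (t : List Char)
    (h : [':', x].isPrefixOf (c :: emoRep p n t) = true) :
    [':', x].isPrefixOf (c :: t) = true := by
  cases n with
  | nil => simp at hn
  | cons n0 n' =>
    have hn0 : n0 = ' ' := by simpa using hn
    subst hn0
    rcases emoRep_head_cases p (' ' :: n') t with rfl | ⟨r, hr⟩ | ⟨c', t', rfl, he⟩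
    · simp only [emoRep] at h
      simp [List.isPrefixOf] at h
    · rw [hr] at h
      simp [List.isPrefixOf, beq_iff_eq] at h
      exact absurd h.2 hx
    · rw [he] at h
      simp [List.isPrefixOf, beq_iff_eq] at h ⊢
      tauto

theorem emoKM3 (z : Char) (hz : z ≠ ' ') (p n : List Char) (hn : n.head? = some ' ')
    (c : Char) (t : List Char)
    (h : [':', '-', z].isPrefixOf (c :: emoRep p n t) = true) :
    [':', '-', z].isPrefixOf (c :: t) = true := by
  cases n with
  | nil => simp at hn
  | cons n0 n' =>
    have hn0 : n0 = ' ' := by simpa using hn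
    subst hn0
    rcases emoRep_head_cases p (' ' :: n') t with rfl | ⟨r, hr⟩ | ⟨c', t', rfl, he⟩
    · simp only [emoRep] at h
      simp [List.isPrefixOf] at h
    · rw [hr] at h
      simp [List.isPrefixOf] at h
    · rw [he] at h
      rcases emoRep_head_cases p (' ' :: n') t' with rfl | ⟨r2, hr2⟩ | ⟨c'', t'', rfl, he2⟩
      · simp only [emoRep] at h
        simp [List.isPrefixOf] at h
      · rw [hr2] at h
        simp [List.isPrefixOf, beq_iff_eq] at h
        exact absurd h.2.2 hz
      · rw [he2] at h
        simp [List.isPrefixOf, beq_iff_eq] at h ⊢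
        tauto

theorem emoRep_colon_free_append (q nq : List Char) (hq : q.head? = some ':')
    (x : List Char) (hx : ':' ∉ x) (t : List Char) :
    emoRep q nq (x ++ t) = x ++ emoRep q nq t := by
  induction x with
  | nil => simp
  | cons a x' ih =>
    have ha : ':' ≠ a := fun h => hx (h ▸ List.mem_cons_self)
    obtain ⟨qt, rfl⟩ : ∃ qt, q = ':' :: qt := by
      cases q with
      | nil => simp at hq
      | cons q0 qt =>
        have : q0 = ':' := by simpa using hq
        exact ⟨qt, by rw [this]⟩
    have h0 : (':' :: qt).isPrefixOf (a :: (x' ++ t)) = false := by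
      simp [List.isPrefixOf, ha]
    rw [List.cons_append, emoRep_cons_neg _ _ _ _ h0,
        ih (fun h => hx (List.mem_cons_of_mem _ h))]
    simp

theorem emoRep_skip (q nq : List Char) (hq : q.head? = some ':') (c0 : Char)
    (x : List Char) (hx : ':' ∉ x) (t : List Char)
    (h0 : q.isPrefixOf (c0 :: (x ++ t)) = false) :
    emoRep q nq ((c0 :: x) ++ t) = (c0 :: x) ++ emoRep q nq t := by
  rw [List.cons_append, emoRep_cons_neg _ _ _ _ h0, emoRep_colon_free_append q nq hq x hx t]
  rfl

theorem emoRep_self (p n : List Char) (hp : p ≠ []) (t : List Char) :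
    emoRep p n (p ++ t) = n ++ emoRep p n t := by
  cases p with
  | nil => exact absurd rfl hp
  | cons a p' =>
    have hpre : (a :: p').isPrefixOf ((a :: p') ++ t) = true :=
      List.isPrefixOf_iff_prefix.mpr (List.prefix_append _ _)
    rw [List.cons_append] at hpre ⊢
    simp only [emoRep, hpre, if_true]
    simp

-- A's seven passes, as a function of the character list
def emoChain (l : List Char) : List Char :=
  emoRep ":|".toList " <EMOTICON_NEUTRAL> ".toList (emoRep ":/".toList " <EMOTICON_CONFUSED> ".toList (emoRep ":D".toList " <EMOTICON_VERY_HAPPY> ".toList (emoRep ":(".toList " <EMOTICON_SAD> ".toList (emoRep ":-(".toList " <EMOTICON_SAD> ".toList (emoRep ":)".toList " <EMOTICON_HAPPY> ".toList (emoRep ":-)".toList " <EMOTICON_HAPPY> ".toList l))))))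


theorem emoSkip_1_2 (t : List Char) :
    emoRep ":-)".toList " <EMOTICON_HAPPY> ".toList (":)".toList ++ t) = ":)".toList ++ emoRep ":-)".toList " <EMOTICON_HAPPY> ".toList t := by
  rw [show (":)" : String).toList = ':' :: [')'] from by decide]
  exact emoRep_skip _ _ (by decide) _ _ (by decide) _ (by simp [List.isPrefixOf])


theorem emoSkip_1_3 (t : List Char) :
    emoRep ":-)".toList " <EMOTICON_HAPPY> ".toList (":-(".toList ++ t) = ":-(".toList ++ emoRep ":-)".toList " <EMOTICON_HAPPY> ".toList t := by
  rw [show (":-(" : String).toList = ':' :: ['-', '('] from by decide]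
  exact emoRep_skip _ _ (by decide) _ _ (by decide) _ (by simp [List.isPrefixOf])


theorem emoSkip_2_3 (t : List Char) :
    emoRep ":)".toList " <EMOTICON_HAPPY> ".toList (":-(".toList ++ t) = ":-(".toList ++ emoRep ":)".toList " <EMOTICON_HAPPY> ".toList t := by
  rw [show (":-(" : String).toList = ':' :: ['-', '('] from by decide]
  exact emoRep_skip _ _ (by decide) _ _ (by decide) _ (by simp [List.isPrefixOf])


theorem emoSkip_1_4 (t : List Char) :
    emoRep ":-)".toList " <EMOTICON_HAPPY> ".toList (":(".toList ++ t) = ":(".toList ++ emoRep ":-)".toList " <EMOTICON_HAPPY> ".toList t := by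
  rw [show (":(" : String).toList = ':' :: ['('] from by decide]
  exact emoRep_skip _ _ (by decide) _ _ (by decide) _ (by simp [List.isPrefixOf])


theorem emoSkip_2_4 (t : List Char) :
    emoRep ":)".toList " <EMOTICON_HAPPY> ".toList (":(".toList ++ t) = ":(".toList ++ emoRep ":)".toList " <EMOTICON_HAPPY> ".toList t := by
  rw [show (":(" : String).toList = ':' :: ['('] from by decide]
  exact emoRep_skip _ _ (by decide) _ _ (by decide) _ (by simp [List.isPrefixOf])


theorem emoSkip_3_4 (t : List Char) :
    emoRep ":-(".toList " <EMOTICON_SAD> ".toList (":(".toList ++ t) = ":(".toList ++ emoRep ":-(".toList " <EMOTICON_SAD> ".toList t := by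
  rw [show (":(" : String).toList = ':' :: ['('] from by decide]
  exact emoRep_skip _ _ (by decide) _ _ (by decide) _ (by simp [List.isPrefixOf])


theorem emoSkip_1_5 (t : List Char) :
    emoRep ":-)".toList " <EMOTICON_HAPPY> ".toList (":D".toList ++ t) = ":D".toList ++ emoRep ":-)".toList " <EMOTICON_HAPPY> ".toList t := by
  rw [show (":D" : String).toList = ':' :: ['D'] from by decide]
  exact emoRep_skip _ _ (by decide) _ _ (by decide) _ (by simp [List.isPrefixOf])


theorem emoSkip_2_5 (t : List Char) :
    emoRep ":)".toList " <EMOTICON_HAPPY> ".toList (":D".toList ++ t) = ":D".toList ++ emoRep ":)".toList " <EMOTICON_HAPPY> ".toList t := by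
  rw [show (":D" : String).toList = ':' :: ['D'] from by decide]
  exact emoRep_skip _ _ (by decide) _ _ (by decide) _ (by simp [List.isPrefixOf])


theorem emoSkip_3_5 (t : List Char) :
    emoRep ":-(".toList " <EMOTICON_SAD> ".toList (":D".toList ++ t) = ":D".toList ++ emoRep ":-(".toList " <EMOTICON_SAD> ".toList t := by
  rw [show (":D" : String).toList = ':' :: ['D'] from by decide]
  exact emoRep_skip _ _ (by decide) _ _ (by decide) _ (by simp [List.isPrefixOf])


theorem emoSkip_4_5 (t : List Char) :
    emoRep ":(".toList " <EMOTICON_SAD> ".toList (":D".toList ++ t) = ":D".toList ++ emoRep ":(".toList " <EMOTICON_SAD> ".toList t := by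
  rw [show (":D" : String).toList = ':' :: ['D'] from by decide]
  exact emoRep_skip _ _ (by decide) _ _ (by decide) _ (by simp [List.isPrefixOf])


theorem emoSkip_1_6 (t : List Char) :
    emoRep ":-)".toList " <EMOTICON_HAPPY> ".toList (":/".toList ++ t) = ":/".toList ++ emoRep ":-)".toList " <EMOTICON_HAPPY> ".toList t := by
  rw [show (":/" : String).toList = ':' :: ['/'] from by decide]
  exact emoRep_skip _ _ (by decide) _ _ (by decide) _ (by simp [List.isPrefixOf])


theorem emoSkip_2_6 (t : List Char) :
    emoRep ":)".toList " <EMOTICON_HAPPY> ".toList (":/".toList ++ t) = ":/".toList ++ emoRep ":)".toList " <EMOTICON_HAPPY> ".toList t := by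
  rw [show (":/" : String).toList = ':' :: ['/'] from by decide]
  exact emoRep_skip _ _ (by decide) _ _ (by decide) _ (by simp [List.isPrefixOf])


theorem emoSkip_3_6 (t : List Char) :
    emoRep ":-(".toList " <EMOTICON_SAD> ".toList (":/".toList ++ t) = ":/".toList ++ emoRep ":-(".toList " <EMOTICON_SAD> ".toList t := by
  rw [show (":/" : String).toList = ':' :: ['/'] from by decide]
  exact emoRep_skip _ _ (by decide) _ _ (by decide) _ (by simp [List.isPrefixOf])


theorem emoSkip_4_6 (t : List Char) :
    emoRep ":(".toList " <EMOTICON_SAD> ".toList (":/".toList ++ t) = ":/".toList ++ emoRep ":(".toList " <EMOTICON_SAD> ".toList t := by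
  rw [show (":/" : String).toList = ':' :: ['/'] from by decide]
  exact emoRep_skip _ _ (by decide) _ _ (by decide) _ (by simp [List.isPrefixOf])


theorem emoSkip_5_6 (t : List Char) :
    emoRep ":D".toList " <EMOTICON_VERY_HAPPY> ".toList (":/".toList ++ t) = ":/".toList ++ emoRep ":D".toList " <EMOTICON_VERY_HAPPY> ".toList t := by
  rw [show (":/" : String).toList = ':' :: ['/'] from by decide]
  exact emoRep_skip _ _ (by decide) _ _ (by decide) _ (by simp [List.isPrefixOf])


theorem emoSkip_1_7 (t : List Char) :
    emoRep ":-)".toList " <EMOTICON_HAPPY> ".toList (":|".toList ++ t) = ":|".toList ++ emoRep ":-)".toList " <EMOTICON_HAPPY> ".toList t := by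
  rw [show (":|" : String).toList = ':' :: ['|'] from by decide]
  exact emoRep_skip _ _ (by decide) _ _ (by decide) _ (by simp [List.isPrefixOf])


theorem emoSkip_2_7 (t : List Char) :
    emoRep ":)".toList " <EMOTICON_HAPPY> ".toList (":|".toList ++ t) = ":|".toList ++ emoRep ":)".toList " <EMOTICON_HAPPY> ".toList t := by
  rw [show (":|" : String).toList = ':' :: ['|'] from by decide]
  exact emoRep_skip _ _ (by decide) _ _ (by decide) _ (by simp [List.isPrefixOf])


theorem emoSkip_3_7 (t : List Char) :
    emoRep ":-(".toList " <EMOTICON_SAD> ".toList (":|".toList ++ t) = ":|".toList ++ emoRep ":-(".toList " <EMOTICON_SAD> ".toList t := by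
  rw [show (":|" : String).toList = ':' :: ['|'] from by decide]
  exact emoRep_skip _ _ (by decide) _ _ (by decide) _ (by simp [List.isPrefixOf])


theorem emoSkip_4_7 (t : List Char) :
    emoRep ":(".toList " <EMOTICON_SAD> ".toList (":|".toList ++ t) = ":|".toList ++ emoRep ":(".toList " <EMOTICON_SAD> ".toList t := by
  rw [show (":|" : String).toList = ':' :: ['|'] from by decide]
  exact emoRep_skip _ _ (by decide) _ _ (by decide) _ (by simp [List.isPrefixOf])


theorem emoSkip_5_7 (t : List Char) :
    emoRep ":D".toList " <EMOTICON_VERY_HAPPY> ".toList (":|".toList ++ t) = ":|".toList ++ emoRep ":D".toList " <EMOTICON_VERY_HAPPY> ".toList t := by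
  rw [show (":|" : String).toList = ':' :: ['|'] from by decide]
  exact emoRep_skip _ _ (by decide) _ _ (by decide) _ (by simp [List.isPrefixOf])


theorem emoSkip_6_7 (t : List Char) :
    emoRep ":/".toList " <EMOTICON_CONFUSED> ".toList (":|".toList ++ t) = ":|".toList ++ emoRep ":/".toList " <EMOTICON_CONFUSED> ".toList t := by
  rw [show (":|" : String).toList = ':' :: ['|'] from by decide]
  exact emoRep_skip _ _ (by decide) _ _ (by decide) _ (by simp [List.isPrefixOf])


theorem emoChain_self_1 (t : List Char) :
    emoChain (":-)".toList ++ t) = " <EMOTICON_HAPPY> ".toList ++ emoChain t := by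
  unfold emoChain
  rw [emoRep_self ":-)".toList " <EMOTICON_HAPPY> ".toList (by decide), emoRep_colon_free_append ":)".toList " <EMOTICON_HAPPY> ".toList (by decide) " <EMOTICON_HAPPY> ".toList (by decide), emoRep_colon_free_append ":-(".toList " <EMOTICON_SAD> ".toList (by decide) " <EMOTICON_HAPPY> ".toList (by decide), emoRep_colon_free_append ":(".toList " <EMOTICON_SAD> ".toList (by decide) " <EMOTICON_HAPPY> ".toList (by decide), emoRep_colon_free_append ":D".toList " <EMOTICON_VERY_HAPPY> ".toList (by decide) " <EMOTICON_HAPPY> ".toList (by decide), emoRep_colon_free_append ":/".toList " <EMOTICON_CONFUSED> ".toList (by decide) " <EMOTICON_HAPPY> ".toList (by decide), emoRep_colon_free_append ":|".toList " <EMOTICON_NEUTRAL> ".toList (by decide) " <EMOTICON_HAPPY> ".toList (by decide)]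


theorem emoChain_self_2 (t : List Char) :
    emoChain (":)".toList ++ t) = " <EMOTICON_HAPPY> ".toList ++ emoChain t := by
  unfold emoChain
  rw [emoSkip_1_2, emoRep_self ":)".toList " <EMOTICON_HAPPY> ".toList (by decide), emoRep_colon_free_append ":-(".toList " <EMOTICON_SAD> ".toList (by decide) " <EMOTICON_HAPPY> ".toList (by decide), emoRep_colon_free_append ":(".toList " <EMOTICON_SAD> ".toList (by decide) " <EMOTICON_HAPPY> ".toList (by decide), emoRep_colon_free_append ":D".toList " <EMOTICON_VERY_HAPPY> ".toList (by decide) " <EMOTICON_HAPPY> ".toList (by decide), emoRep_colon_free_append ":/".toList " <EMOTICON_CONFUSED> ".toList (by decide) " <EMOTICON_HAPPY> ".toList (by decide), emoRep_colon_free_append ":|".toList " <EMOTICON_NEUTRAL> ".toList (by decide) " <EMOTICON_HAPPY> ".toList (by decide)]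


theorem emoChain_self_3 (t : List Char) :
    emoChain (":-(".toList ++ t) = " <EMOTICON_SAD> ".toList ++ emoChain t := by
  unfold emoChain
  rw [emoSkip_1_3, emoSkip_2_3, emoRep_self ":-(".toList " <EMOTICON_SAD> ".toList (by decide), emoRep_colon_free_append ":(".toList " <EMOTICON_SAD> ".toList (by decide) " <EMOTICON_SAD> ".toList (by decide), emoRep_colon_free_append ":D".toList " <EMOTICON_VERY_HAPPY> ".toList (by decide) " <EMOTICON_SAD> ".toList (by decide), emoRep_colon_free_append ":/".toList " <EMOTICON_CONFUSED> ".toList (by decide) " <EMOTICON_SAD> ".toList (by decide), emoRep_colon_free_append ":|".toList " <EMOTICON_NEUTRAL> ".toList (by decide) " <EMOTICON_SAD> ".toList (by decide)]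


theorem emoChain_self_4 (t : List Char) :
    emoChain (":(".toList ++ t) = " <EMOTICON_SAD> ".toList ++ emoChain t := by
  unfold emoChain
  rw [emoSkip_1_4, emoSkip_2_4, emoSkip_3_4, emoRep_self ":(".toList " <EMOTICON_SAD> ".toList (by decide), emoRep_colon_free_append ":D".toList " <EMOTICON_VERY_HAPPY> ".toList (by decide) " <EMOTICON_SAD> ".toList (by decide), emoRep_colon_free_append ":/".toList " <EMOTICON_CONFUSED> ".toList (by decide) " <EMOTICON_SAD> ".toList (by decide), emoRep_colon_free_append ":|".toList " <EMOTICON_NEUTRAL> ".toList (by decide) " <EMOTICON_SAD> ".toList (by decide)]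


theorem emoChain_self_5 (t : List Char) :
    emoChain (":D".toList ++ t) = " <EMOTICON_VERY_HAPPY> ".toList ++ emoChain t := by
  unfold emoChain
  rw [emoSkip_1_5, emoSkip_2_5, emoSkip_3_5, emoSkip_4_5, emoRep_self ":D".toList " <EMOTICON_VERY_HAPPY> ".toList (by decide), emoRep_colon_free_append ":/".toList " <EMOTICON_CONFUSED> ".toList (by decide) " <EMOTICON_VERY_HAPPY> ".toList (by decide), emoRep_colon_free_append ":|".toList " <EMOTICON_NEUTRAL> ".toList (by decide) " <EMOTICON_VERY_HAPPY> ".toList (by decide)]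


theorem emoChain_self_6 (t : List Char) :
    emoChain (":/".toList ++ t) = " <EMOTICON_CONFUSED> ".toList ++ emoChain t := by
  unfold emoChain
  rw [emoSkip_1_6, emoSkip_2_6, emoSkip_3_6, emoSkip_4_6, emoSkip_5_6, emoRep_self ":/".toList " <EMOTICON_CONFUSED> ".toList (by decide), emoRep_colon_free_append ":|".toList " <EMOTICON_NEUTRAL> ".toList (by decide) " <EMOTICON_CONFUSED> ".toList (by decide)]


theorem emoChain_self_7 (t : List Char) :
    emoChain (":|".toList ++ t) = " <EMOTICON_NEUTRAL> ".toList ++ emoChain t := by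
  unfold emoChain
  rw [emoSkip_1_7, emoSkip_2_7, emoSkip_3_7, emoSkip_4_7, emoSkip_5_7, emoSkip_6_7, emoRep_self ":|".toList " <EMOTICON_NEUTRAL> ".toList (by decide)]


theorem emoChain_cons (c : Char) (t : List Char)
    (h : ∀ pr ∈ emoTable, ¬ (pr.1.isPrefixOf (c :: t) = true)) :
    emoChain (c :: t) = c :: emoChain t := by
  have h1 : (":-)".toList).isPrefixOf (c :: t) = false :=
    Bool.eq_false_iff.mpr (h (":-)".toList, " <EMOTICON_HAPPY> ".toList) (by decide))
  have h2 : (":)".toList).isPrefixOf (c :: t) = false :=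
    Bool.eq_false_iff.mpr (h (":)".toList, " <EMOTICON_HAPPY> ".toList) (by decide))
  have h3 : (":-(".toList).isPrefixOf (c :: t) = false :=
    Bool.eq_false_iff.mpr (h (":-(".toList, " <EMOTICON_SAD> ".toList) (by decide))
  have h4 : (":(".toList).isPrefixOf (c :: t) = false :=
    Bool.eq_false_iff.mpr (h (":(".toList, " <EMOTICON_SAD> ".toList) (by decide))
  have h5 : (":D".toList).isPrefixOf (c :: t) = false :=
    Bool.eq_false_iff.mpr (h (":D".toList, " <EMOTICON_VERY_HAPPY> ".toList) (by decide))
  have h6 : (":/".toList).isPrefixOf (c :: t) = false :=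
    Bool.eq_false_iff.mpr (h (":/".toList, " <EMOTICON_CONFUSED> ".toList) (by decide))
  have h7 : (":|".toList).isPrefixOf (c :: t) = false :=
    Bool.eq_false_iff.mpr (h (":|".toList, " <EMOTICON_NEUTRAL> ".toList) (by decide))
  have np1 := h1
  have np2 : (":)".toList).isPrefixOf (c :: emoRep ":-)".toList " <EMOTICON_HAPPY> ".toList t) = false := by
    cases hb : (":)".toList).isPrefixOf (c :: emoRep ":-)".toList " <EMOTICON_HAPPY> ".toList t) with
    | false => rfl
    | true =>
      rw [show (":)" : String).toList = [':', ')'] from by decide] at hb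
      have hb1 := emoKM2 ')' (by decide) ":-)".toList " <EMOTICON_HAPPY> ".toList (by decide) c _ hb
      rw [show (":)" : String).toList = [':', ')'] from by decide] at h2
      exact absurd hb1 (by simp [h2])
  have np3 : (":-(".toList).isPrefixOf (c :: emoRep ":)".toList " <EMOTICON_HAPPY> ".toList (emoRep ":-)".toList " <EMOTICON_HAPPY> ".toList t)) = false := by
    cases hb : (":-(".toList).isPrefixOf (c :: emoRep ":)".toList " <EMOTICON_HAPPY> ".toList (emoRep ":-)".toList " <EMOTICON_HAPPY> ".toList t)) with
    | false => rfl
    | true =>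
      rw [show (":-(" : String).toList = [':', '-', '('] from by decide] at hb
      have hb1 := emoKM3 '(' (by decide) ":)".toList " <EMOTICON_HAPPY> ".toList (by decide) c _ hb
      have hb2 := emoKM3 '(' (by decide) ":-)".toList " <EMOTICON_HAPPY> ".toList (by decide) c _ hb1
      rw [show (":-(" : String).toList = [':', '-', '('] from by decide] at h3
      exact absurd hb2 (by simp [h3])
  have np4 : (":(".toList).isPrefixOf (c :: emoRep ":-(".toList " <EMOTICON_SAD> ".toList (emoRep ":)".toList " <EMOTICON_HAPPY> ".toList (emoRep ":-)".toList " <EMOTICON_HAPPY> ".toList t))) = false := by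
    cases hb : (":(".toList).isPrefixOf (c :: emoRep ":-(".toList " <EMOTICON_SAD> ".toList (emoRep ":)".toList " <EMOTICON_HAPPY> ".toList (emoRep ":-)".toList " <EMOTICON_HAPPY> ".toList t))) with
    | false => rfl
    | true =>
      rw [show (":(" : String).toList = [':', '('] from by decide] at hb
      have hb1 := emoKM2 '(' (by decide) ":-(".toList " <EMOTICON_SAD> ".toList (by decide) c _ hb
      have hb2 := emoKM2 '(' (by decide) ":)".toList " <EMOTICON_HAPPY> ".toList (by decide) c _ hb1
      have hb3 := emoKM2 '(' (by decide) ":-)".toList " <EMOTICON_HAPPY> ".toList (by decide) c _ hb2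
      rw [show (":(" : String).toList = [':', '('] from by decide] at h4
      exact absurd hb3 (by simp [h4])
  have np5 : (":D".toList).isPrefixOf (c :: emoRep ":(".toList " <EMOTICON_SAD> ".toList (emoRep ":-(".toList " <EMOTICON_SAD> ".toList (emoRep ":)".toList " <EMOTICON_HAPPY> ".toList (emoRep ":-)".toList " <EMOTICON_HAPPY> ".toList t)))) = false := by
    cases hb : (":D".toList).isPrefixOf (c :: emoRep ":(".toList " <EMOTICON_SAD> ".toList (emoRep ":-(".toList " <EMOTICON_SAD> ".toList (emoRep ":)".toList " <EMOTICON_HAPPY> ".toList (emoRep ":-)".toList " <EMOTICON_HAPPY> ".toList t)))) with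
    | false => rfl
    | true =>
      rw [show (":D" : String).toList = [':', 'D'] from by decide] at hb
      have hb1 := emoKM2 'D' (by decide) ":(".toList " <EMOTICON_SAD> ".toList (by decide) c _ hb
      have hb2 := emoKM2 'D' (by decide) ":-(".toList " <EMOTICON_SAD> ".toList (by decide) c _ hb1
      have hb3 := emoKM2 'D' (by decide) ":)".toList " <EMOTICON_HAPPY> ".toList (by decide) c _ hb2
      have hb4 := emoKM2 'D' (by decide) ":-)".toList " <EMOTICON_HAPPY> ".toList (by decide) c _ hb3
      rw [show (":D" : String).toList = [':', 'D'] from by decide] at h5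
      exact absurd hb4 (by simp [h5])
  have np6 : (":/".toList).isPrefixOf (c :: emoRep ":D".toList " <EMOTICON_VERY_HAPPY> ".toList (emoRep ":(".toList " <EMOTICON_SAD> ".toList (emoRep ":-(".toList " <EMOTICON_SAD> ".toList (emoRep ":)".toList " <EMOTICON_HAPPY> ".toList (emoRep ":-)".toList " <EMOTICON_HAPPY> ".toList t))))) = false := by
    cases hb : (":/".toList).isPrefixOf (c :: emoRep ":D".toList " <EMOTICON_VERY_HAPPY> ".toList (emoRep ":(".toList " <EMOTICON_SAD> ".toList (emoRep ":-(".toList " <EMOTICON_SAD> ".toList (emoRep ":)".toList " <EMOTICON_HAPPY> ".toList (emoRep ":-)".toList " <EMOTICON_HAPPY> ".toList t))))) with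
    | false => rfl
    | true =>
      rw [show (":/" : String).toList = [':', '/'] from by decide] at hb
      have hb1 := emoKM2 '/' (by decide) ":D".toList " <EMOTICON_VERY_HAPPY> ".toList (by decide) c _ hb
      have hb2 := emoKM2 '/' (by decide) ":(".toList " <EMOTICON_SAD> ".toList (by decide) c _ hb1
      have hb3 := emoKM2 '/' (by decide) ":-(".toList " <EMOTICON_SAD> ".toList (by decide) c _ hb2
      have hb4 := emoKM2 '/' (by decide) ":)".toList " <EMOTICON_HAPPY> ".toList (by decide) c _ hb3
      have hb5 := emoKM2 '/' (by decide) ":-)".toList " <EMOTICON_HAPPY> ".toList (by decide) c _ hb4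
      rw [show (":/" : String).toList = [':', '/'] from by decide] at h6
      exact absurd hb5 (by simp [h6])
  have np7 : (":|".toList).isPrefixOf (c :: emoRep ":/".toList " <EMOTICON_CONFUSED> ".toList (emoRep ":D".toList " <EMOTICON_VERY_HAPPY> ".toList (emoRep ":(".toList " <EMOTICON_SAD> ".toList (emoRep ":-(".toList " <EMOTICON_SAD> ".toList (emoRep ":)".toList " <EMOTICON_HAPPY> ".toList (emoRep ":-)".toList " <EMOTICON_HAPPY> ".toList t)))))) = false := by
    cases hb : (":|".toList).isPrefixOf (c :: emoRep ":/".toList " <EMOTICON_CONFUSED> ".toList (emoRep ":D".toList " <EMOTICON_VERY_HAPPY> ".toList (emoRep ":(".toList " <EMOTICON_SAD> ".toList (emoRep ":-(".toList " <EMOTICON_SAD> ".toList (emoRep ":)".toList " <EMOTICON_HAPPY> ".toList (emoRep ":-)".toList " <EMOTICON_HAPPY> ".toList t)))))) with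
    | false => rfl
    | true =>
      rw [show (":|" : String).toList = [':', '|'] from by decide] at hb
      have hb1 := emoKM2 '|' (by decide) ":/".toList " <EMOTICON_CONFUSED> ".toList (by decide) c _ hb
      have hb2 := emoKM2 '|' (by decide) ":D".toList " <EMOTICON_VERY_HAPPY> ".toList (by decide) c _ hb1
      have hb3 := emoKM2 '|' (by decide) ":(".toList " <EMOTICON_SAD> ".toList (by decide) c _ hb2
      have hb4 := emoKM2 '|' (by decide) ":-(".toList " <EMOTICON_SAD> ".toList (by decide) c _ hb3
      have hb5 := emoKM2 '|' (by decide) ":)".toList " <EMOTICON_HAPPY> ".toList (by decide) c _ hb4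
      have hb6 := emoKM2 '|' (by decide) ":-)".toList " <EMOTICON_HAPPY> ".toList (by decide) c _ hb5
      rw [show (":|" : String).toList = [':', '|'] from by decide] at h7
      exact absurd hb6 (by simp [h7])
  unfold emoChain
  rw [emoRep_cons_neg _ _ _ _ np1, emoRep_cons_neg _ _ _ _ np2, emoRep_cons_neg _ _ _ _ np3, emoRep_cons_neg _ _ _ _ np4, emoRep_cons_neg _ _ _ _ np5, emoRep_cons_neg _ _ _ _ np6, emoRep_cons_neg _ _ _ _ np7]

theorem emoChain_nil : emoChain [] = [] := by
  simp [emoChain, emoRep]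

theorem chain_eq_scan : ∀ l : List Char, emoChain l = emoScan l := by
  suffices H : ∀ (m : Nat) (l : List Char), l.length ≤ m → emoChain l = emoScan l from
    fun l => H l.length l le_rfl
  intro m
  induction m with
  | zero =>
    intro l hl
    have : l = [] := by cases l <;> simp_all
    subst this
    rw [emoChain_nil]
    simp [emoScan]
  | succ m ih =>
    intro l hl
    cases l with
    | nil =>
      rw [emoChain_nil]
      simp [emoScan]
    | cons c t =>
      cases hf : emoTable.find? (fun pr => pr.1.isPrefixOf (c :: t)) with
      | none =>
        have hnone := List.find?_eq_none.mp hf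
        rw [emoChain_cons c t hnone]
        conv_rhs => rw [emoScan]
        rw [hf]
        have ht : t.length ≤ m := by simp at hl; omega
        rw [ih t ht]
      | some pr =>
        have hmem := List.mem_of_find?_eq_some hf
        have hp := List.find?_some hf
        simp only [emoTable, List.mem_cons, List.not_mem_nil, or_false] at hmem
        rcases hmem with hmem|hmem|hmem|hmem|hmem|hmem|hmem
        · subst hmem
          have hp' : (":-)".toList).isPrefixOf (c :: t) = true := hp
          obtain ⟨s, hs0⟩ := List.isPrefixOf_iff_prefix.mp hp'
          have hxs : (":-)" : String).toList = ':' :: ['-', ')'] := by decide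
          have hst : t = ['-', ')'] ++ s := by
            have hs1 := hs0
            rw [hxs, List.cons_append] at hs1
            injection hs1 with h1 h2
            exact h2.symm
          have hslen : s.length ≤ m := by
            have hlt := congrArg List.length hst
            simp only [List.length_append] at hlt
            simp only [List.length_cons] at hl
            omega
          have hdrop : t.drop ((":-)".toList).length - 1) = s := by
            rw [hst, show (":-)".toList).length - 1 = (['-', ')'] : List Char).length from by decide, List.drop_left]
          conv_rhs => rw [emoScan, hf]
          show emoChain (c :: t) = " <EMOTICON_HAPPY> ".toList ++ emoScan (t.drop ((":-)".toList).length - 1))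
          rw [hdrop, ← hs0, emoChain_self_1 s, ih s hslen]
        · subst hmem
          have hp' : (":)".toList).isPrefixOf (c :: t) = true := hp
          obtain ⟨s, hs0⟩ := List.isPrefixOf_iff_prefix.mp hp'
          have hxs : (":)" : String).toList = ':' :: [')'] := by decide
          have hst : t = [')'] ++ s := by
            have hs1 := hs0
            rw [hxs, List.cons_append] at hs1
            injection hs1 with h1 h2
            exact h2.symm
          have hslen : s.length ≤ m := by
            have hlt := congrArg List.length hst
            simp only [List.length_append] at hlt
            simp only [List.length_cons] at hl
            omega
          have hdrop : t.drop ((":)".toList).length - 1) = s := by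
            rw [hst, show (":)".toList).length - 1 = ([')'] : List Char).length from by decide, List.drop_left]
          conv_rhs => rw [emoScan, hf]
          show emoChain (c :: t) = " <EMOTICON_HAPPY> ".toList ++ emoScan (t.drop ((":)".toList).length - 1))
          rw [hdrop, ← hs0, emoChain_self_2 s, ih s hslen]
        · subst hmem
          have hp' : (":-(".toList).isPrefixOf (c :: t) = true := hp
          obtain ⟨s, hs0⟩ := List.isPrefixOf_iff_prefix.mp hp'
          have hxs : (":-(" : String).toList = ':' :: ['-', '('] := by decide
          have hst : t = ['-', '('] ++ s := by
            have hs1 := hs0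
            rw [hxs, List.cons_append] at hs1
            injection hs1 with h1 h2
            exact h2.symm
          have hslen : s.length ≤ m := by
            have hlt := congrArg List.length hst
            simp only [List.length_append] at hlt
            simp only [List.length_cons] at hl
            omega
          have hdrop : t.drop ((":-(".toList).length - 1) = s := by
            rw [hst, show (":-(".toList).length - 1 = (['-', '('] : List Char).length from by decide, List.drop_left]
          conv_rhs => rw [emoScan, hf]
          show emoChain (c :: t) = " <EMOTICON_SAD> ".toList ++ emoScan (t.drop ((":-(".toList).length - 1))
          rw [hdrop, ← hs0, emoChain_self_3 s, ih s hslen]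
        · subst hmem
          have hp' : (":(".toList).isPrefixOf (c :: t) = true := hp
          obtain ⟨s, hs0⟩ := List.isPrefixOf_iff_prefix.mp hp'
          have hxs : (":(" : String).toList = ':' :: ['('] := by decide
          have hst : t = ['('] ++ s := by
            have hs1 := hs0
            rw [hxs, List.cons_append] at hs1
            injection hs1 with h1 h2
            exact h2.symm
          have hslen : s.length ≤ m := by
            have hlt := congrArg List.length hst
            simp only [List.length_append] at hlt
            simp only [List.length_cons] at hl
            omega
          have hdrop : t.drop ((":(".toList).length - 1) = s := by
            rw [hst, show (":(".toList).length - 1 = (['('] : List Char).length from by decide, List.drop_left]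
          conv_rhs => rw [emoScan, hf]
          show emoChain (c :: t) = " <EMOTICON_SAD> ".toList ++ emoScan (t.drop ((":(".toList).length - 1))
          rw [hdrop, ← hs0, emoChain_self_4 s, ih s hslen]
        · subst hmem
          have hp' : (":D".toList).isPrefixOf (c :: t) = true := hp
          obtain ⟨s, hs0⟩ := List.isPrefixOf_iff_prefix.mp hp'
          have hxs : (":D" : String).toList = ':' :: ['D'] := by decide
          have hst : t = ['D'] ++ s := by
            have hs1 := hs0
            rw [hxs, List.cons_append] at hs1
            injection hs1 with h1 h2
            exact h2.symm
          have hslen : s.length ≤ m := by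
            have hlt := congrArg List.length hst
            simp only [List.length_append] at hlt
            simp only [List.length_cons] at hl
            omega
          have hdrop : t.drop ((":D".toList).length - 1) = s := by
            rw [hst, show (":D".toList).length - 1 = (['D'] : List Char).length from by decide, List.drop_left]
          conv_rhs => rw [emoScan, hf]
          show emoChain (c :: t) = " <EMOTICON_VERY_HAPPY> ".toList ++ emoScan (t.drop ((":D".toList).length - 1))
          rw [hdrop, ← hs0, emoChain_self_5 s, ih s hslen]
        · subst hmem
          have hp' : (":/".toList).isPrefixOf (c :: t) = true := hp
          obtain ⟨s, hs0⟩ := List.isPrefixOf_iff_prefix.mp hp'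
          have hxs : (":/" : String).toList = ':' :: ['/'] := by decide
          have hst : t = ['/'] ++ s := by
            have hs1 := hs0
            rw [hxs, List.cons_append] at hs1
            injection hs1 with h1 h2
            exact h2.symm
          have hslen : s.length ≤ m := by
            have hlt := congrArg List.length hst
            simp only [List.length_append] at hlt
            simp only [List.length_cons] at hl
            omega
          have hdrop : t.drop ((":/".toList).length - 1) = s := by
            rw [hst, show (":/".toList).length - 1 = (['/'] : List Char).length from by decide, List.drop_left]
          conv_rhs => rw [emoScan, hf]
          show emoChain (c :: t) = " <EMOTICON_CONFUSED> ".toList ++ emoScan (t.drop ((":/".toList).length - 1))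
          rw [hdrop, ← hs0, emoChain_self_6 s, ih s hslen]
        · subst hmem
          have hp' : (":|".toList).isPrefixOf (c :: t) = true := hp
          obtain ⟨s, hs0⟩ := List.isPrefixOf_iff_prefix.mp hp'
          have hxs : (":|" : String).toList = ':' :: ['|'] := by decide
          have hst : t = ['|'] ++ s := by
            have hs1 := hs0
            rw [hxs, List.cons_append] at hs1
            injection hs1 with h1 h2
            exact h2.symm
          have hslen : s.length ≤ m := by
            have hlt := congrArg List.length hst
            simp only [List.length_append] at hlt
            simp only [List.length_cons] at hl
            omega
          have hdrop : t.drop ((":|".toList).length - 1) = s := by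
            rw [hst, show (":|".toList).length - 1 = (['|'] : List Char).length from by decide, List.drop_left]
          conv_rhs => rw [emoScan, hf]
          show emoChain (c :: t) = " <EMOTICON_NEUTRAL> ".toList ++ emoScan (t.drop ((":|".toList).length - 1))
          rw [hdrop, ← hs0, emoChain_self_7 s, ih s hslen]

-- ===== VERDICT (by name: the statement is the Claim_ definition above) =====
theorem preserve_emoticons_py_spec : Claim_equal_preserve_emoticons_py := by
  intro text _
  unfold Spec_preserve_emoticons_py preserve_emoticons_py preserve_emoticons_py_alt
  apply String.toList_inj.mp
  simp only [PySem.Str.toList_replace, String.toList_ofList]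
  rw [replace_eq_emoRep ":-)".toList " <EMOTICON_HAPPY> ".toList (by decide)]
  rw [replace_eq_emoRep ":)".toList " <EMOTICON_HAPPY> ".toList (by decide)]
  rw [replace_eq_emoRep ":-(".toList " <EMOTICON_SAD> ".toList (by decide)]
  rw [replace_eq_emoRep ":(".toList " <EMOTICON_SAD> ".toList (by decide)]
  rw [replace_eq_emoRep ":D".toList " <EMOTICON_VERY_HAPPY> ".toList (by decide)]
  rw [replace_eq_emoRep ":/".toList " <EMOTICON_CONFUSED> ".toList (by decide)]
  rw [replace_eq_emoRep ":|".toList " <EMOTICON_NEUTRAL> ".toList (by decide)]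
  have h := chain_eq_scan text.toList
  unfold emoChain at h
  exact h
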